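-- pv_equiv track=rewrite | github.com/fraserbaigent/aoc | 2023/18/solution.py | get_lines_2
-- ===== SOURCE A (Python) =====
-- def get_lines_2(data):
--     dir_map = ['R','D','L','U']
--     x = 0
--     y = 0
--     lines = list()
--     dirs = {
--         'R' : (1,0),
--         'L' : (-1,0),
--         'U' : (0,1),
--         'D' : (0, -1),
--         }
--     for d in data:
--         v = int(d[2], 16)
--         d = dir_map[d[3]]
--         m = dirs[d]
--         dx = m[0] * v
--         dy = m[1] * v
--         nx = x+dx
--         ny = y+dy
--         lines.append(((x,y),(nx,ny)))
--         x = nx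
--         y = ny
--     return lines
-- ===== SOURCE B (Python) =====
-- def get_lines_2(data):
--     # Three-pass decomposition: per-instruction deltas, prefix-sum to vertices, zip adjacent pairs.
--     dirs = {'R': (1, 0), 'L': (-1, 0), 'U': (0, 1), 'D': (0, -1)}
--     deltas = [(dirs['RDLU'[d[3]]][0] * int(d[2], 16),
--                dirs['RDLU'[d[3]]][1] * int(d[2], 16)) for d in data]
--     pts = [(0, 0)]
--     for dx, dy in deltas:
--         px, py = pts[-1]
--         pts.append((px + dx, py + dy))
--     return list(zip(pts, pts[1:]))
-- ===== Notes on version B (the rewrite author's own statement) =====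
-- stated objective: alternative
-- what changed: A threads a running (x,y) and appends segments inside one loop; B first maps instructions to (dx,dy) deltas, then prefix-sums them into a vertex list, then pairs adjacent vertices with zip.
import Mathlib
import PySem

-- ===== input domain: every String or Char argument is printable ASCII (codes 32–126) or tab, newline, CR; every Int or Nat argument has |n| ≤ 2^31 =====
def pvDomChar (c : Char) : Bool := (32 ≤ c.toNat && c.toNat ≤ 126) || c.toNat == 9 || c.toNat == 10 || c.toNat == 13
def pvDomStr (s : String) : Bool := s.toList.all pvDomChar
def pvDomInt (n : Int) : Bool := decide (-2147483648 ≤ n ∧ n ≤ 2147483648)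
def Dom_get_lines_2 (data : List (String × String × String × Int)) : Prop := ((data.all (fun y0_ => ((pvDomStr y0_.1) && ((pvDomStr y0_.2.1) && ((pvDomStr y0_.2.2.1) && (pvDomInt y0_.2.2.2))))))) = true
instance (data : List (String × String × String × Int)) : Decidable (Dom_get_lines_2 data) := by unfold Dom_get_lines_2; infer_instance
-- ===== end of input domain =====

-- B replaces A's single running-(x,y) loop by deltas → prefix-summed vertex list → zip of adjacent vertices (alternative decomposition, same cost).

-- ===== PORT A =====
def pvDirsA : PySem.Dict String (Int × Int) :=
  ((((PySem.Dict.empty).insert "R" (1,0)).insert "L" (-1,0)).insert "U" (0,1)).insert "D" (0,-1)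

def get_lines_2 (data : List (String × String × String × Int)) : List ((Int × Int) × (Int × Int)) :=
  let dir_map : List String := ["R", "D", "L", "U"]
  (data.foldl (fun (st : Int × Int × List ((Int × Int) × (Int × Int))) d =>
      let x := st.1
      let y := st.2.1
      let lines := st.2.2
      let v := (PySem.Int.ofStrBase? d.2.2.1 16).getD 0            -- int(d[2], 16); Pre_ excludes the none case
      let dc := (PySem.List.pyGet? dir_map d.2.2.2).getD ""        -- dir_map[d[3]]; Pre_ excludes the none case
      let m := (pvDirsA.get? dc).getD (0, 0)                       -- dirs[d]; never a KeyError under Pre_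
      let dx := m.1 * v
      let dy := m.2 * v
      let nx := x + dx
      let ny := y + dy
      (nx, ny, lines ++ [((x, y), (nx, ny))])) (0, 0, [])).2.2

-- ===== PORT B =====
def pvDirsB : PySem.Dict Char (Int × Int) :=
  ((((PySem.Dict.empty).insert 'R' (1,0)).insert 'L' (-1,0)).insert 'U' (0,1)).insert 'D' (0,-1)

def pvDelta (d : String × String × String × Int) : Int × Int :=
  let c := (PySem.Str.pyGet? "RDLU" d.2.2.2).getD ' '              -- 'RDLU'[d[3]]; Pre_ excludes the none case
  let m := (pvDirsB.get? c).getD (0, 0)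
  let v := (PySem.Int.ofStrBase? d.2.2.1 16).getD 0
  (m.1 * v, m.2 * v)

def get_lines_2_alt (data : List (String × String × String × Int)) : List ((Int × Int) × (Int × Int)) :=
  let deltas := data.map pvDelta
  let pts := deltas.foldl (fun (pts : List (Int × Int)) δ =>
      let p := PySem.List.pyGetD pts (-1) (0, 0)                   -- pts[-1]; pts is never empty
      pts ++ [(p.1 + δ.1, p.2 + δ.2)]) [(0, 0)]
  pts.zip pts.tail

-- ===== PRECONDITION & SPEC =====
-- Pre_ excludes exactly the inputs on which A raises: an entry whose hex field is not a
-- valid base-16 int literal (ValueError) or whose index field is outside [-4,4) (IndexError).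
def Pre_get_lines_2 (data : List (String × String × String × Int)) : Prop :=
  ∀ d ∈ data, (PySem.Int.ofStrBase? d.2.2.1 16).isSome = true ∧ PySem.Raise.InRange 4 d.2.2.2
instance (data : List (String × String × String × Int)) : Decidable (Pre_get_lines_2 data) := by
  unfold Pre_get_lines_2; infer_instance

def pvWitness_get_lines_2 : (List (String × String × String × Int)) :=
  [("x", "y", "a", 0), ("", "", "1f", -3)]

def Spec_get_lines_2 (data : List (String × String × String × Int)) (out : List ((Int × Int) × (Int × Int))) : Prop := out = get_lines_2_alt data
instance (data : List (String × String × String × Int)) (out : List ((Int × Int) × (Int × Int))) : Decidable (Spec_get_lines_2 data out) := by unfold Spec_get_lines_2; infer_instance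

-- ===== CLAIM (what is proved, stated in full; the proofs are below) =====
def Claim_equal_get_lines_2 : Prop := ∀ (data : List (String × String × String × Int)), Dom_get_lines_2 data → Pre_get_lines_2 data → Spec_get_lines_2 data (get_lines_2 data)

-- ===== LEMMAS AND PROOFS =====

-- segments generated from a start point by a delta list (common reference shape)
def pvSegs (p : Int × Int) : List (Int × Int) → List ((Int × Int) × (Int × Int))
  | [] => []
  | δ :: r => ((p, (p.1 + δ.1, p.2 + δ.2))) :: pvSegs (p.1 + δ.1, p.2 + δ.2) r

-- points after p generated by a delta list
def pvScan (p : Int × Int) : List (Int × Int) → List (Int × Int)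
  | [] => []
  | δ :: r => (p.1 + δ.1, p.2 + δ.2) :: pvScan (p.1 + δ.1, p.2 + δ.2) r

-- per-item: under Pre_'s InRange condition, A's multiplier lookup equals B's
lemma pvStepEq (i : Int) (h : PySem.Raise.InRange 4 i) :
    ((pvDirsA.get? ((PySem.List.pyGet? ["R","D","L","U"] i).getD "")).getD ((0 : Int), (0 : Int))) =
    ((pvDirsB.get? ((PySem.List.pyGet? ['R','D','L','U'] i).getD ' ')).getD (0,0)) := by
  have h' : -4 ≤ i ∧ i < 4 := by
    simpa [PySem.Raise.InRange] using h
  obtain ⟨h1, h2⟩ := h'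
  interval_cases i <;> decide

-- A's fold from state (x, y, lines) produces lines ++ pvSegs (x,y) (deltas)
lemma pvFoldA (ds : List (String × String × String × Int))
    (hpre : ∀ d ∈ ds, PySem.Raise.InRange 4 d.2.2.2) :
    ∀ (x y : Int) (lines : List ((Int × Int) × (Int × Int))),
    (ds.foldl (fun (st : Int × Int × List ((Int × Int) × (Int × Int))) d =>
      let x := st.1
      let y := st.2.1
      let lines := st.2.2
      let v := (PySem.Int.ofStrBase? d.2.2.1 16).getD 0
      let dc := (PySem.List.pyGet? ["R","D","L","U"] d.2.2.2).getD ""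
      let m := (pvDirsA.get? dc).getD (0, 0)
      let dx := m.1 * v
      let dy := m.2 * v
      let nx := x + dx
      let ny := y + dy
      (nx, ny, lines ++ [((x, y), (nx, ny))])) (x, y, lines)).2.2
      = lines ++ pvSegs (x, y) (ds.map pvDelta) := by
  induction ds with
  | nil => intro x y lines; simp [pvSegs]
  | cons d r ih =>
    intro x y lines
    have hd : PySem.Raise.InRange 4 d.2.2.2 := hpre d (by simp)
    have hr : ∀ e ∈ r, PySem.Raise.InRange 4 e.2.2.2 := fun e he => hpre e (by simp [he])
    simp only [List.foldl_cons, List.map_cons, pvSegs]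
    rw [ih hr]
    simp [pvDelta, pvStepEq d.2.2.2 hd]

-- B's point-building fold, relative to any nonempty prefix
lemma pvFoldB (δs : List (Int × Int)) :
    ∀ (pre : List (Int × Int)) (p : Int × Int),
    (δs.foldl (fun (pts : List (Int × Int)) δ =>
        let q := PySem.List.pyGetD pts (-1) (0, 0)
        pts ++ [(q.1 + δ.1, q.2 + δ.2)]) (pre ++ [p]))
      = pre ++ p :: pvScan p δs := by
  induction δs with
  | nil => intro pre p; simp [pvScan]
  | cons δ r ih =>
    intro pre p
    simp only [List.foldl_cons, pvScan]
    rw [PySem.List.pyGetD_neg_one_append_singleton]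
    rw [ih (pre ++ [p]) (p.1 + δ.1, p.2 + δ.2)]
    simp

-- zipping the vertex chain with its tail gives the segments
lemma pvZipScan (δs : List (Int × Int)) :
    ∀ p : Int × Int, (p :: pvScan p δs).zip (pvScan p δs) = pvSegs p δs := by
  induction δs with
  | nil => intro p; simp [pvScan, pvSegs]
  | cons δ r ih =>
    intro p
    simp only [pvScan, pvSegs, List.zip_cons_cons]
    rw [ih (p.1 + δ.1, p.2 + δ.2)]

-- ===== VERDICT (by name: the statement is the Claim_ definition above) =====
theorem get_lines_2_spec : Claim_equal_get_lines_2 := by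
  intro data _hdom hpre
  unfold Spec_get_lines_2 get_lines_2 get_lines_2_alt
  have hA := pvFoldA data (fun d hd => (hpre d hd).2) 0 0 []
  simp only at hA ⊢
  rw [hA]
  have hB := pvFoldB (data.map pvDelta) [] ((0 : Int), (0 : Int))
  simp only [List.nil_append] at hB
  rw [hB]
  simp only [List.tail_cons]
  rw [pvZipScan]
  simp
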